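-- pv_equiv track=rewrite | github.com/kennethbrennan/RAG | classes/pdf_parser.py | parse_search
-- ===== SOURCE A (Python) =====
-- def parse_search(full_text):
-- # Keywords indicating sections to remove
--     removal_keywords = ["References", "Footnotes", "See also"]
--
--     # Locate the earliest occurrence of any removal keyword
--     min_index = len(full_text)
--     for keyword in removal_keywords:
--         index = full_text.find(keyword)
--         if index != -1 and index < min_index:
--             min_index = index
--
--     # Truncate text at the earliest keyword
--     if min_index < len(full_text):
--         full_text = full_text[:min_index]
--
--     return full_text.strip()  # Return the cleaned text
-- ===== SOURCE B (Python) =====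
-- def parse_search(full_text):
--     # Single left-to-right scan: stop at the first position where any
--     # section keyword starts, truncate there and strip.
--     keywords = ("References", "Footnotes", "See also")
--     for j in range(len(full_text)):
--         if full_text.startswith(keywords, j):
--             return full_text[:j].strip()
--     return full_text.strip()
-- ===== Notes on version B (the rewrite author's own statement) =====
-- stated objective: idiomatic
-- what changed: Replaced the three separate full-text find() scans plus min-index bookkeeping with a single left-to-right pass that stops at the first position where any keyword starts (str.startswith with a keyword tuple) and returns immediately.
import Mathlib
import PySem

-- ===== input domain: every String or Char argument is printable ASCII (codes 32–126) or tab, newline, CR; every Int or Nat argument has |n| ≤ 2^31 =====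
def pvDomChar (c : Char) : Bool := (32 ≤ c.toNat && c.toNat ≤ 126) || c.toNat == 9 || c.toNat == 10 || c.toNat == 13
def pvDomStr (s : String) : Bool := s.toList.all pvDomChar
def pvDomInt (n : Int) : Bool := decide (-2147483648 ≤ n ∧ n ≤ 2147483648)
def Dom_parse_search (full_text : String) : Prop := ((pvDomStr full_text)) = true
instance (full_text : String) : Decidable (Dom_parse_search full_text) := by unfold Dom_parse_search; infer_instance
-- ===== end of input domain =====

-- B replaces A's three full-text find() scans + min-index bookkeeping by one left-to-right
-- scan that stops at the first position where any keyword starts (more idiomatic).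

-- ===== PORT A =====
def parse_search (full_text : String) : String :=
  let removal_keywords : List String := ["References", "Footnotes", "See also"]
  let min_index : Int :=
    removal_keywords.foldl
      (fun min_index keyword =>
        let index := PySem.Str.find full_text keyword
        if index ≠ -1 ∧ index < min_index then index else min_index)
      (PySem.Str.len full_text)
  let full_text :=
    if min_index < PySem.Str.len full_text then PySem.Str.slice full_text none (some min_index)
    else full_text
  PySem.Str.strip full_text

-- ===== PORT B =====
-- full_text.startswith(("References", "Footnotes", "See also"), j)
def pvKwHit (suff : List Char) : Bool :=
  "References".toList.isPrefixOf suff || "Footnotes".toList.isPrefixOf suff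
    || "See also".toList.isPrefixOf suff

-- the `for j in range(len(full_text))` loop: pref = full_text[:j], suff = full_text[j:]
def pvScan : List Char → List Char → List Char
  | pref, [] => pref
  | pref, c :: rest => if pvKwHit (c :: rest) then pref else pvScan (pref ++ [c]) rest

def parse_search_alt (full_text : String) : String :=
  PySem.Str.strip (String.ofList (pvScan [] full_text.toList))

-- ===== PRECONDITION & SPEC =====
def Spec_parse_search (full_text : String) (out : String) : Prop := out = parse_search_alt full_text
instance (full_text : String) (out : String) : Decidable (Spec_parse_search full_text out) := by unfold Spec_parse_search; infer_instance

-- ===== CLAIM (what is proved, stated in full; the proofs are below) =====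
def Claim_equal_parse_search : Prop := ∀ (full_text : String), Dom_parse_search full_text → Spec_parse_search full_text (parse_search full_text)

-- ===== LEMMAS AND PROOFS =====

theorem pv_ofList_toList (s : String) : String.ofList s.toList = s := by simp

-- characterization of A's min-index fold
theorem pvFold_spec (cs : List Char) (ks : List String) (a : Int) :
    (ks.foldl
        (fun m kw =>
          let i := PySem.Chars.find cs kw.toList
          if i ≠ -1 ∧ i < m then i else m) a = a ∨
      ∃ kw ∈ ks, ks.foldl
        (fun m kw =>
          let i := PySem.Chars.find cs kw.toList
          if i ≠ -1 ∧ i < m then i else m) a = PySem.Chars.find cs kw.toList ∧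
        PySem.Chars.find cs kw.toList ≠ -1) ∧
    ks.foldl
        (fun m kw =>
          let i := PySem.Chars.find cs kw.toList
          if i ≠ -1 ∧ i < m then i else m) a ≤ a ∧
    ∀ kw ∈ ks, PySem.Chars.find cs kw.toList ≠ -1 →
      ks.foldl
        (fun m kw =>
          let i := PySem.Chars.find cs kw.toList
          if i ≠ -1 ∧ i < m then i else m) a ≤ PySem.Chars.find cs kw.toList := by
  induction ks generalizing a with
  | nil => simp
  | cons k ks ih =>
    simp only [List.foldl_cons]
    by_cases h : PySem.Chars.find cs k.toList ≠ -1 ∧ PySem.Chars.find cs k.toList < a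
    · obtain ⟨h1, h2, h3⟩ := ih (PySem.Chars.find cs k.toList)
      rw [if_pos h]
      refine ⟨?_, le_trans h2 (le_of_lt h.2), ?_⟩
      · rcases h1 with h1 | ⟨kw, hkw, he, hn⟩
        · exact Or.inr ⟨k, by simp, h1, h.1⟩
        · exact Or.inr ⟨kw, by simp [hkw], he, hn⟩
      · intro kw hkw hn
        rcases List.mem_cons.mp hkw with rfl | hkw
        · exact h2
        · exact h3 kw hkw hn
    · obtain ⟨h1, h2, h3⟩ := ih a
      rw [if_neg h]
      refine ⟨?_, h2, ?_⟩
      · rcases h1 with h1 | ⟨kw, hkw, he, hn⟩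
        · exact Or.inl h1
        · exact Or.inr ⟨kw, by simp [hkw], he, hn⟩
      · intro kw hkw hn
        rcases List.mem_cons.mp hkw with rfl | hkw
        · push_neg at h
          exact le_trans h2 (h hn)
        · exact h3 kw hkw hn

theorem pvKwHit_iff (suff : List Char) :
    pvKwHit suff = true ↔
      ("References".toList <+: suff ∨ "Footnotes".toList <+: suff ∨ "See also".toList <+: suff) := by
  simp [pvKwHit, List.isPrefixOf_iff_prefix, or_assoc]

-- B's scan returns the prefix up to the first hit
theorem pvScan_eq (suff pref : List Char) (m : Nat) (hm : m ≤ suff.length)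
    (h1 : ∀ i < m, pvKwHit (suff.drop i) = false)
    (h2 : m < suff.length → pvKwHit (suff.drop m) = true) :
    pvScan pref suff = pref ++ suff.take m := by
  induction suff generalizing pref m with
  | nil =>
    have : m = 0 := Nat.le_zero.mp hm
    subst this
    simp [pvScan]
  | cons c rest ih =>
    by_cases hh : pvKwHit (c :: rest) = true
    · have hm0 : m = 0 := by
        by_contra h0
        have := h1 0 (Nat.pos_of_ne_zero h0)
        simp at this
        exact absurd hh (by simp [this])
      subst hm0
      simp [pvScan, hh]
    · have hm1 : 1 ≤ m := by
        rcases Nat.eq_zero_or_pos m with rfl | h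
        · exact absurd (h2 (by simp)) hh
        · exact h
      have : pvScan (pref ++ [c]) rest = (pref ++ [c]) ++ rest.take (m - 1) := by
        refine ih (pref ++ [c]) (m - 1) (by simp at hm; omega) ?_ ?_
        · intro i hi
          have := h1 (i + 1) (by omega)
          simpa using this
        · intro hlt
          have := h2 (by simp; omega)
          have hdrop : (c :: rest).drop m = rest.drop (m - 1) := by
            rcases Nat.exists_eq_add_of_le hm1 with ⟨k, rfl⟩
            simp [Nat.add_comm]
          rwa [hdrop] at this
      rw [pvScan, if_neg (by simp [hh])]
      rw [this]
      rcases Nat.exists_eq_add_of_le hm1 with ⟨k, rfl⟩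
      simp [List.take_succ_cons, Nat.add_comm]

-- ===== VERDICT (by name: the statement is the Claim_ definition above) =====
theorem parse_search_spec : Claim_equal_parse_search := by
  intro ft _
  unfold Spec_parse_search parse_search parse_search_alt
  simp only [PySem.Str.find_eq]
  set cs := ft.toList with hcs
  set r : Int :=
    ([("References" : String), "Footnotes", "See also"]).foldl
      (fun m kw =>
        let i := PySem.Chars.find cs kw.toList
        if i ≠ -1 ∧ i < m then i else m) (PySem.Str.len ft) with hr
  have hlen : PySem.Str.len ft = (cs.length : Int) := by
    simp [PySem.Str.len_eq, hcs]
  obtain ⟨h1, h2, h3⟩ := pvFold_spec cs ["References", "Footnotes", "See also"] (PySem.Str.len ft)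
  rw [← hr] at h1 h2 h3
  have hr0 : 0 ≤ r := by
    rcases h1 with h1 | ⟨kw, _, he, hn⟩
    · rw [h1, hlen]; positivity
    · rw [he]
      have := PySem.Chars.neg_one_le_find cs kw.toList
      omega
  have hrlen : r ≤ (cs.length : Int) := by rw [← hlen]; exact h2
  -- no keyword starts before position r
  have hno : ∀ i < r.toNat, pvKwHit (cs.drop i) = false := by
    intro i hi
    by_contra hcon
    rw [Bool.not_eq_false, pvKwHit_iff] at hcon
    have key : ∀ kw : String, kw ∈ (["References", "Footnotes", "See also"] : List String) →
        kw.toList <+: cs.drop i → False := by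
      intro kw hkw hpre
      have hne : PySem.Chars.find cs kw.toList ≠ -1 := by
        rw [Ne, PySem.Chars.find_eq_neg_one_iff]
        intro hni
        exact hni ((PySem.Chars.isIn_iff_infix kw.toList cs).mp
          ((PySem.Chars.exists_prefix_drop_iff_isIn kw.toList cs).mp ⟨i, hpre⟩))
      have hle := h3 kw hkw hne
      have hfnn : 0 ≤ PySem.Chars.find cs kw.toList := by
        have := PySem.Chars.neg_one_le_find cs kw.toList
        omega
      have := (PySem.Chars.find_spec hfnn).2 i (by omega)
      exact this hpre
    rcases hcon with h | h | h
    · exact key "References" (by simp) h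
    · exact key "Footnotes" (by simp) h
    · exact key "See also" (by simp) h
  -- a keyword starts at r when r < length
  have hyes : r < (cs.length : Int) → pvKwHit (cs.drop r.toNat) = true := by
    intro hlt
    rcases h1 with h1 | ⟨kw, hkw, he, hn⟩
    · rw [h1, hlen] at hlt; omega
    · have hfnn : 0 ≤ PySem.Chars.find cs kw.toList := by rw [← he]; exact hr0
      have hpre := (PySem.Chars.find_spec hfnn).1
      rw [← he] at hpre
      rw [pvKwHit_iff]
      fin_cases hkw
      · exact Or.inl hpre
      · exact Or.inr (Or.inl hpre)
      · exact Or.inr (Or.inr hpre)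
  have hscan : pvScan [] cs = cs.take r.toNat := by
    rcases lt_or_ge r (cs.length : Int) with hlt | hge
    · exact pvScan_eq cs [] r.toNat (by omega) hno (fun _ => hyes hlt)
    · have : r = (cs.length : Int) := le_antisymm hrlen hge
      rw [pvScan_eq cs [] cs.length le_rfl
        (by intro i hi; exact hno i (by omega)) (by omega)]
      simp [this]
  -- both sides strip strings with equal toList
  have harg : (if r < PySem.Str.len ft then PySem.Str.slice ft none (some r) else ft)
      = String.ofList (pvScan [] cs) := by
    rw [hscan]
    split_ifs with hlt
    · have : (PySem.Str.slice ft none (some r)).toList = cs.take r.toNat := by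
        rw [PySem.Str.toList_slice]
        simp only [PySem.Chars.slice_eq_listSlice]
        rw [PySem.List.slice_to _ hr0]
      rw [← this, pv_ofList_toList]
    · rw [hlen] at hlt
      have heq : r.toNat = cs.length := by omega
      rw [heq, List.take_length, hcs, pv_ofList_toList]
  rw [harg]
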